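-- pv_equiv track=rewrite | github.com/cutehammond772/problem-solving-archive | 백준/Gold/14677. 병약한 윤호/병약한 윤호.py | solve
-- ===== SOURCE A (Python) =====
-- from collections import deque
--
-- mappings = {
--     "B": 0,
--     "L": 1,
--     "D": 2,
-- }
--
-- def solve(N, S):
--     # (count, order, left, right)
--     queue = deque([(0, 0, 0, N - 1)])
--     memo = [[-1] * N for _ in range(N)]
--     result = 0
--
--     while queue:
--         count, order, left, right = queue.popleft()
--
--         if left > right:
--             continue
--
--         if memo[left][right] >= 0:
--             continue
--
--         memo[left][right] = count
--
--         if order == mappings[S[left]]: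
--             result = max(result, count + 1)
--             queue.append((count + 1, (order + 1) % 3, left + 1, right))
--
--         if order == mappings[S[right]]:
--             result = max(result, count + 1)
--             queue.append((count + 1, (order + 1) % 3, left, right - 1))
--
--     return result
-- ===== SOURCE B (Python) =====
-- mappings = {
--     "B": 0,
--     "L": 1,
--     "D": 2,
-- }
--
-- def solve(N, S):
--     # Bottom-up interval DP: best[l] holds, for the current interval length,
--     # the maximum number of characters eatable starting from interval [l, l+length-1].
--     if N <= 0:
--         return 0
--     prev = [0] * (N + 1)
--     for length in range(1, N + 1):
--         cur = []
--         for l in range(N - length + 1):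
--             r = l + length - 1
--             o = (l + (N - 1 - r)) % 3
--             best = 0
--             if mappings.get(S[l]) == o:
--                 best = 1 + prev[l + 1]
--             if mappings.get(S[r]) == o:
--                 best = max(best, 1 + prev[l])
--             cur.append(best)
--         prev = cur
--     return prev[0]
-- ===== Notes on version B (the rewrite author's own statement) =====
-- stated objective: alternative
-- what changed: A's BFS over a deque of (count,order,left,right) states with a 2-D visited/memo array is replaced by a bottom-up interval dynamic program that iterates over interval lengths, keeping one row of best-continuation values per length; no queue and no visited set remain.
-- outside the precondition, e.g. on solve(3, 'LXL'): A returns 0, B returns 0; on solve(2, 'BX'): A raises KeyError, B returns 1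
import Mathlib
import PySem

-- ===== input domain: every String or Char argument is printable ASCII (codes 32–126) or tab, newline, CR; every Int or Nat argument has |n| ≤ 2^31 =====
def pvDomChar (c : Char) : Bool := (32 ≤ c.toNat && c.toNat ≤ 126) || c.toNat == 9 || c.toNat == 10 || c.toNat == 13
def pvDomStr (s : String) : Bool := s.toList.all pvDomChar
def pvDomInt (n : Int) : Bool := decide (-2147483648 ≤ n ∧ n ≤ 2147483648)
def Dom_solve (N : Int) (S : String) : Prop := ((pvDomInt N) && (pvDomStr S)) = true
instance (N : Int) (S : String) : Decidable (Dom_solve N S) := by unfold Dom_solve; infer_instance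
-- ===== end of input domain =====

-- B replaces A's BFS queue + visited memo over interval states by a bottom-up
-- interval DP over interval lengths (objective: alternative decomposition, same cost).

-- ===== PORT A =====

-- mappings = {"B": 0, "L": 1, "D": 2}
def pvMappings : PySem.Dict Char Int := PySem.Dict.mk [('B', 0), ('L', 1), ('D', 2)]

-- mappings[S[i]] as an Option: none where Python raises IndexError/KeyError (outside Pre_)
def pvLook (S : String) (i : Int) : Option Int :=
  (PySem.Str.pyGet? S i).bind (fun c => PySem.Dict.get? pvMappings c)

-- memo[i][j] (none where Python would raise IndexError; A never indexes out of range)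
def pvMget (m : List (List Int)) (i j : Int) : Option Int :=
  if 0 ≤ i ∧ 0 ≤ j then (m[i.toNat]?).bind (fun row => row[j.toNat]?) else none

-- memo[i][j] = v
def pvMset (m : List (List Int)) (i j : Int) (v : Int) : List (List Int) :=
  if 0 ≤ i ∧ 0 ≤ j then
    match m[i.toNat]? with
    | some row => m.set i.toNat (row.set j.toNat v)
    | none => m
  else m

-- number of still-unvisited memo cells (termination measure of the BFS loop)
def pvNegCount (m : List (List Int)) : Nat :=
  (m.map (fun row => (row.filter (fun x => decide (x < 0))).length)).sum

theorem pvRowSet_lt (r : List Int) (j : Nat) (c v : Int) (hv : r[j]? = some v)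
    (hvneg : v < 0) (hc : 0 ≤ c) :
    ((r.set j c).filter (fun x => decide (x < 0))).length
      < (r.filter (fun x => decide (x < 0))).length := by
  induction r generalizing j with
  | nil => simp at hv
  | cons x xs ihx =>
    cases j with
    | zero =>
      simp at hv; subst hv
      simp [hvneg, not_lt.mpr hc]
    | succ j' =>
      simp at hv
      have := ihx j' hv
      by_cases hx : x < 0 <;> simp [List.filter, hx] <;> omega

theorem pvNegCount_set_lt (rows : List (List Int)) (i j : Nat) (c : Int)
    (row : List Int) (v : Int) (hrow : rows[i]? = some row) (hv : row[j]? = some v)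
    (hvneg : v < 0) (hc : 0 ≤ c) :
    pvNegCount (rows.set i (row.set j c)) < pvNegCount rows := by
  induction rows generalizing i with
  | nil => simp at hrow
  | cons r rs ih =>
    cases i with
    | zero =>
      simp at hrow; subst hrow
      simp only [List.set_cons_zero, pvNegCount, List.map_cons, List.sum_cons]
      have := pvRowSet_lt r j c v hv hvneg hc
      omega
    | succ i' =>
      simp at hrow
      have := ih i' hrow
      simp only [List.set_cons_succ, pvNegCount, List.map_cons, List.sum_cons] at *
      omega

theorem pvNegCount_mset_lt (m : List (List Int)) (i j : Int) (v : Int) (c : Nat)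
    (h : pvMget m i j = some v) (hv : v < 0) :
    pvNegCount (pvMset m i j (c : Int)) < pvNegCount m := by
  unfold pvMget at h
  unfold pvMset
  split at h
  · rename_i hij
    rw [if_pos hij]
    cases hrow : m[i.toNat]? with
    | none => rw [hrow] at h; simp at h
    | some row =>
      rw [hrow] at h; simp at h
      exact pvNegCount_set_lt m i.toNat j.toNat c row v hrow h hv (Int.natCast_nonneg c)
  · simp at h

-- the while-queue loop of A; state (count, order, left, right), count kept as the
-- (always nonnegative) Python count
def solveLoop (N : Int) (S : String) :
    List (Nat × Int × Int × Int) → List (List Int) → Int → Int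
  | [], _, result => result
  | (count, order, left, right) :: rest, memo, result =>
    if left > right then solveLoop N S rest memo result
    else
      match hm : pvMget memo left right with
      | none => solveLoop N S rest memo result  -- Python raises IndexError here; never reached by A
      | some v =>
        if 0 ≤ v then solveLoop N S rest memo result
        else
          -- memo[left][right] = count
          let memo' := pvMset memo left right (count : Int)
          -- if order == mappings[S[left]]: ...
          let result₁ := if pvLook S left = some order then max result ((count : Int) + 1) else result
          let queue₁ := if pvLook S left = some order then
              rest ++ [(count + 1, PySem.Int.mod (order + 1) 3, left + 1, right)] else rest
          -- if order == mappings[S[right]]: ...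
          let result₂ := if pvLook S right = some order then max result₁ ((count : Int) + 1) else result₁
          let queue₂ := if pvLook S right = some order then
              queue₁ ++ [(count + 1, PySem.Int.mod (order + 1) 3, left, right - 1)] else queue₁
          solveLoop N S queue₂ memo' result₂
  termination_by q m _ => 3 * pvNegCount m + q.length
  decreasing_by
  · simp only [List.length_cons]; omega
  · simp only [List.length_cons]; omega
  · simp only [List.length_cons]; omega
  · rename_i hv
    have hlt := pvNegCount_mset_lt memo left right v count hm (by omega)
    simp only [List.length_cons]
    split <;> split <;>
      (try simp only [List.length_append, List.length_cons, List.length_nil]) <;> omega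

def solve (N : Int) (S : String) : Int :=
  solveLoop N S [(0, 0, 0, N - 1)]
    (List.replicate N.toNat (List.replicate N.toNat (-1))) 0

-- ===== PORT B =====

def solve_alt (N : Int) (S : String) : Int :=
  if N ≤ 0 then 0
  else
    let prev0 : List Int := List.replicate (N + 1).toNat 0
    let final := (PySem.List.pyRange 1 (N + 1)).foldl (fun prev length =>
      (PySem.List.pyRange 0 (N - length + 1)).foldl (fun cur l =>
        let r := l + length - 1
        let o := PySem.Int.mod (l + (N - 1 - r)) 3
        let best := if pvLook S l = some o then 1 + PySem.List.pyGetD prev (l + 1) 0 else 0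
        let best := if pvLook S r = some o then max best (1 + PySem.List.pyGetD prev l 0) else best
        cur ++ [best]) []) prev0
    PySem.List.pyGetD final 0 0  -- prev[0]; final always has exactly one element here

-- ===== PRECONDITION & SPEC =====

-- Pre_ excludes the inputs where Python A raises: N larger than len(S) (IndexError) and
-- strings whose first N characters are not all 'B'/'L'/'D' (KeyError on every character A
-- inspects; A still returns 0 when its scan never touches the offending character — that
-- narrowing is cited in claim.json).
def Pre_solve (N : Int) (S : String) : Prop :=
  N ≤ (S.toList.length : Int) ∧
    ((S.toList.take N.toNat).all (fun c => c == 'B' || c == 'L' || c == 'D')) = true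
instance (N : Int) (S : String) : Decidable (Pre_solve N S) := by unfold Pre_solve; infer_instance

def pvWitness_solve : Int × String := (2, "BL")

def Spec_solve (N : Int) (S : String) (out : Int) : Prop := out = solve_alt N S
instance (N : Int) (S : String) (out : Int) : Decidable (Spec_solve N S out) := by
  unfold Spec_solve; infer_instance

-- ===== CLAIM (what is proved, stated in full; the proofs are below) =====
def Claim_equal_solve : Prop := ∀ (N : Int) (S : String), Dom_solve N S → Pre_solve N S → Spec_solve N S (solve N S)

-- ===== LEMMAS AND PROOFS =====

-- the interval value both programs compute: the maximum number of characters eatable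
-- from the interval [l, r], given that l + (N-1-r) characters were already eaten
def pvRec (N : Int) (S : String) (l r : Int) : Int :=
  if l > r then 0
  else
    max (if pvLook S l = some (PySem.Int.mod (l + (N - 1 - r)) 3) then 1 + pvRec N S (l + 1) r else 0)
        (if pvLook S r = some (PySem.Int.mod (l + (N - 1 - r)) 3) then 1 + pvRec N S l (r - 1) else 0)
  termination_by (r + 1 - l).toNat
  decreasing_by all_goals omega

theorem pvRec_nonneg (N : Int) (S : String) (l r : Int) : 0 ≤ pvRec N S l r := by
  rw [pvRec]
  split
  · exact le_refl 0
  · refine le_max_of_le_right ?_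
    split
    · have := pvRec_nonneg N S l (r - 1)
      omega
    · exact le_refl 0
  termination_by (r + 1 - l).toNat
  decreasing_by omega

-- ===== A-side machinery =====

-- characters eaten before reaching interval [l, r]
def pvCnt (N l r : Int) : Int := l + (N - 1 - r)
-- the meal due at interval [l, r]
def pvOrd (N l r : Int) : Int := PySem.Int.mod (pvCnt N l r) 3
def pvMatchL (N : Int) (S : String) (l r : Int) : Prop := pvLook S l = some (pvOrd N l r)
def pvMatchR (N : Int) (S : String) (l r : Int) : Prop := pvLook S r = some (pvOrd N l r)

-- the interval states A's BFS can reach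
inductive pvReach (N : Int) (S : String) : Int → Int → Prop
  | init : pvReach N S 0 (N - 1)
  | left {l r : Int} : pvReach N S l r → 0 ≤ l → l ≤ r → r ≤ N - 1 →
      pvMatchL N S l r → pvReach N S (l + 1) r
  | right {l r : Int} : pvReach N S l r → 0 ≤ l → l ≤ r → r ≤ N - 1 →
      pvMatchR N S l r → pvReach N S l (r - 1)

def pvVis (m : List (List Int)) (l r : Int) : Prop := ∃ v, pvMget m l r = some v ∧ 0 ≤ v
def pvInQ (q : List (Nat × Int × Int × Int)) (l r : Int) : Prop := ∃ c o, (c, o, l, r) ∈ q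
def pvShape (N : Int) (m : List (List Int)) : Prop :=
  m.length = N.toNat ∧ ∀ row ∈ m, row.length = N.toNat

-- loop invariant of A's BFS
def pvInv (N : Int) (S : String) (q : List (Nat × Int × Int × Int))
    (m : List (List Int)) (res : Int) : Prop :=
  pvShape N m
  ∧ (∀ c o l r, (c, o, l, r) ∈ q → pvReach N S l r ∧ o = pvOrd N l r ∧ (c : Int) = pvCnt N l r
      ∧ 0 ≤ l ∧ r ≤ N - 1 ∧ (c : Int) ≤ res)
  ∧ (∀ l r, pvVis m l r → pvReach N S l r ∧ 0 ≤ l ∧ l ≤ r ∧ r ≤ N - 1 ∧ pvCnt N l r ≤ res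
      ∧ (pvMatchL N S l r → pvCnt N l r + 1 ≤ res ∧ (l + 1 ≤ r → pvVis m (l + 1) r ∨ pvInQ q (l + 1) r))
      ∧ (pvMatchR N S l r → pvCnt N l r + 1 ≤ res ∧ (l ≤ r - 1 → pvVis m l (r - 1) ∨ pvInQ q l (r - 1))))
  ∧ (N ≤ 0 ∨ pvVis m 0 (N - 1) ∨ pvInQ q 0 (N - 1))
  ∧ 0 ≤ res ∧ res ≤ pvRec N S 0 (N - 1)

theorem pvMod3_succ (a : Int) : PySem.Int.mod (PySem.Int.mod a 3 + 1) 3 = PySem.Int.mod (a + 1) 3 := by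
  rw [PySem.Int.mod_eq_emod_of_pos (by norm_num), PySem.Int.mod_eq_emod_of_pos (by norm_num),
    PySem.Int.mod_eq_emod_of_pos (by norm_num)]
  omega

theorem pvOrd_left (N l r : Int) : pvOrd N (l + 1) r = PySem.Int.mod (pvOrd N l r + 1) 3 := by
  unfold pvOrd pvCnt
  rw [pvMod3_succ]
  ring_nf

theorem pvOrd_right (N l r : Int) : pvOrd N l (r - 1) = PySem.Int.mod (pvOrd N l r + 1) 3 := by
  unfold pvOrd pvCnt
  rw [pvMod3_succ]
  ring_nf

theorem pvRec_left_ge (N : Int) (S : String) (l r : Int) (h1 : l ≤ r) (hm : pvMatchL N S l r) :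
    1 + pvRec N S (l + 1) r ≤ pvRec N S l r := by
  unfold pvMatchL pvOrd pvCnt at hm
  conv_rhs => rw [pvRec, if_neg (by omega)]
  exact le_max_of_le_left (by rw [if_pos hm])

theorem pvRec_right_ge (N : Int) (S : String) (l r : Int) (h1 : l ≤ r) (hm : pvMatchR N S l r) :
    1 + pvRec N S l (r - 1) ≤ pvRec N S l r := by
  unfold pvMatchR pvOrd pvCnt at hm
  conv_rhs => rw [pvRec, if_neg (by omega)]
  exact le_max_of_le_right (by rw [if_pos hm])

theorem pvReach_le (N : Int) (S : String) (l r : Int) (h : pvReach N S l r) :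
    pvCnt N l r + pvRec N S l r ≤ pvRec N S 0 (N - 1) := by
  induction h with
  | init =>
    unfold pvCnt
    omega
  | left h' h0 h1 h2 hm ih =>
    rename_i l' r'
    have := pvRec_left_ge N S l' r' h1 hm
    unfold pvCnt at *
    omega
  | right h' h0 h1 h2 hm ih =>
    rename_i l' r'
    have := pvRec_right_ge N S l' r' h1 hm
    unfold pvCnt at *
    omega

theorem pvLtOfGet {α : Type} (l : List α) (i : Nat) (x : α) (h : l[i]? = some x) :
    i < l.length := by
  by_contra hc
  rw [List.getElem?_eq_none (by omega)] at h
  simp at h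

theorem pvMget_mset (m : List (List Int)) (i j v w : Int) (h : pvMget m i j = some v)
    (i' j' : Int) :
    pvMget (pvMset m i j w) i' j' = if i' = i ∧ j' = j then some w else pvMget m i' j' := by
  unfold pvMget at h
  split at h
  case isFalse => simp at h
  case isTrue hij =>
  cases hrow : m[i.toNat]? with
  | none => rw [hrow] at h; simp at h
  | some row =>
    rw [hrow] at h; simp at h
    have hilt : i.toNat < m.length := pvLtOfGet m i.toNat row hrow
    have hjlt : j.toNat < row.length := pvLtOfGet row j.toNat v h
    unfold pvMset
    rw [if_pos hij, hrow]
    unfold pvMget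
    by_cases hq : 0 ≤ i' ∧ 0 ≤ j'
    · rw [if_pos hq, if_pos hq]
      by_cases he : i' = i ∧ j' = j
      · obtain ⟨rfl, rfl⟩ := he
        rw [if_pos ⟨rfl, rfl⟩]
        rw [List.getElem?_set_self (by simpa using hilt)]
        simp
        rw [List.getElem?_set_self (by simpa using hjlt)]
      · rw [if_neg he]
        by_cases hi : i'.toNat = i.toNat
        · have hieq : i' = i := by omega
          have hj : j' ≠ j := by tauto
          have hjne : j'.toNat ≠ j.toNat := by omega
          rw [hieq, List.getElem?_set_self (by simpa using hilt), hrow]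
          simp
          rw [List.getElem?_set_ne (by omega)]
        · rw [List.getElem?_set_ne (by omega)]
    · rw [if_neg hq, if_neg hq]
      rw [if_neg (by rintro ⟨rfl, rfl⟩; exact hq hij)]

theorem pvVis_mset (m : List (List Int)) (i j v : Int) (c : Nat)
    (h : pvMget m i j = some v) (x y : Int) :
    pvVis (pvMset m i j (c : Int)) x y ↔ ((x = i ∧ y = j) ∨ pvVis m x y) := by
  unfold pvVis
  rw [pvMget_mset m i j v (c : Int) h x y]
  by_cases he : x = i ∧ y = j
  · rw [if_pos he]
    simp only [he, and_self, true_or, iff_true]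
    exact ⟨(c : Int), rfl, by positivity⟩
  · rw [if_neg he]
    simp [he]

theorem pvShape_mset (N : Int) (m : List (List Int)) (i j w : Int)
    (hs : pvShape N m) : pvShape N (pvMset m i j w) := by
  obtain ⟨h1, h2⟩ := hs
  unfold pvMset
  split
  · split
    · rename_i row hrow
      refine ⟨by simpa using h1, ?_⟩
      intro r hr
      rcases List.mem_or_eq_of_mem_set hr with hmem | rfl
      · exact h2 r hmem
      · rw [List.length_set]
        exact h2 row (List.mem_of_getElem? hrow)
    · exact ⟨h1, h2⟩
  · exact ⟨h1, h2⟩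

theorem pvMget_isSome (N : Int) (m : List (List Int)) (l r : Int) (hs : pvShape N m)
    (h0 : 0 ≤ l) (h1 : l ≤ r) (h2 : r ≤ N - 1) : ∃ v, pvMget m l r = some v := by
  obtain ⟨hlen, hrows⟩ := hs
  have hl : l.toNat < m.length := by omega
  have hrow : m[l.toNat]? = some m[l.toNat] := List.getElem?_eq_getElem hl
  have hrlen : (m[l.toNat]).length = N.toNat := hrows _ (List.getElem_mem hl)
  have hr : r.toNat < (m[l.toNat]).length := by omega
  refine ⟨m[l.toNat][r.toNat], ?_⟩
  unfold pvMget
  rw [if_pos ⟨h0, by omega⟩, hrow]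
  simpa using List.getElem?_eq_getElem hr

theorem pvVis_replicate (N : Int) (l r : Int) :
    ¬ pvVis (List.replicate N.toNat (List.replicate N.toNat (-1))) l r := by
  rintro ⟨v, hv, hge⟩
  unfold pvMget at hv
  split at hv
  · rw [List.getElem?_replicate] at hv
    split at hv
    · simp only [Option.bind_some, List.getElem?_replicate] at hv
      split at hv
      · simp at hv
        omega
      · simp at hv
    · simp at hv
  · simp at hv

-- once the queue is empty, every visited state's full value is dominated by result
theorem pvDrain (N : Int) (S : String) (m : List (List Int)) (res : Int)
    (hV : ∀ l r, pvVis m l r → pvReach N S l r ∧ 0 ≤ l ∧ l ≤ r ∧ r ≤ N - 1 ∧ pvCnt N l r ≤ res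
      ∧ (pvMatchL N S l r → pvCnt N l r + 1 ≤ res ∧ (l + 1 ≤ r → pvVis m (l + 1) r ∨ pvInQ [] (l + 1) r))
      ∧ (pvMatchR N S l r → pvCnt N l r + 1 ≤ res ∧ (l ≤ r - 1 → pvVis m l (r - 1) ∨ pvInQ [] l (r - 1)))) :
    ∀ (k : Nat) (l r : Int), (r + 1 - l).toNat ≤ k → pvVis m l r →
      pvCnt N l r + pvRec N S l r ≤ res := by
  intro k
  induction k with
  | zero =>
    intro l r hk hvis
    obtain ⟨_, _, hlr, _, _⟩ := hV l r hvis
    omega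
  | succ k ih =>
    intro l r hk hvis
    obtain ⟨_, hl0, hlr, hrN, hcle, hL, hR⟩ := hV l r hvis
    rw [pvRec, if_neg (by omega)]
    have hA : pvCnt N l r
        + (if pvLook S l = some (PySem.Int.mod (l + (N - 1 - r)) 3) then 1 + pvRec N S (l + 1) r else 0)
        ≤ res := by
      split
      · rename_i hcond
        have hmL : pvMatchL N S l r := hcond
        obtain ⟨hres1, hchild⟩ := hL hmL
        by_cases hgood : l + 1 ≤ r
        · rcases hchild hgood with hv' | hq'
          · have := ih (l + 1) r (by omega) hv'
            unfold pvCnt at *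
            omega
          · exact absurd hq' (by rintro ⟨_, _, h⟩; simp at h)
        · rw [pvRec, if_pos (by omega)]
          omega
      · omega
    have hB : pvCnt N l r
        + (if pvLook S r = some (PySem.Int.mod (l + (N - 1 - r)) 3) then 1 + pvRec N S l (r - 1) else 0)
        ≤ res := by
      split
      · rename_i hcond
        have hmR : pvMatchR N S l r := hcond
        obtain ⟨hres1, hchild⟩ := hR hmR
        by_cases hgood : l ≤ r - 1
        · rcases hchild hgood with hv' | hq'
          · have := ih l (r - 1) (by omega) hv'
            unfold pvCnt at *
            omega
          · exact absurd hq' (by rintro ⟨_, _, h⟩; simp at h)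
        · rw [pvRec, if_pos (by omega)]
          omega
      · omega
    rcases max_cases
        (if pvLook S l = some (PySem.Int.mod (l + (N - 1 - r)) 3) then 1 + pvRec N S (l + 1) r else 0)
        (if pvLook S r = some (PySem.Int.mod (l + (N - 1 - r)) 3) then 1 + pvRec N S l (r - 1) else 0)
      with ⟨heq, _⟩ | ⟨heq, _⟩ <;> omega

theorem pvInQ_cons (e : Nat × Int × Int × Int) (rest : List (Nat × Int × Int × Int))
    (l r : Int) (h : pvInQ (e :: rest) l r) :
    (e.2.2.1 = l ∧ e.2.2.2 = r) ∨ pvInQ rest l r := by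
  obtain ⟨c', o', hmem⟩ := h
  rcases List.mem_cons.mp hmem with heq | hm
  · left; rw [← heq]; exact ⟨rfl, rfl⟩
  · right; exact ⟨c', o', hm⟩

-- dropping a popped entry that is out of order (l > r) or already visited
theorem pvInvDrop (N : Int) (S : String) (c : Nat) (o l r : Int)
    (rest : List (Nat × Int × Int × Int)) (m : List (List Int)) (res : Int)
    (hInv : pvInv N S ((c, o, l, r) :: rest) m res)
    (hcover : l > r ∨ pvVis m l r) : pvInv N S rest m res := by
  obtain ⟨hShape, hQ, hV, hI0, hres0, hresU⟩ := hInv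
  refine ⟨hShape, ?_, ?_, ?_, hres0, hresU⟩
  · intro c' o' x y hmem
    exact hQ c' o' x y (List.mem_cons_of_mem _ hmem)
  · intro x y hvis
    obtain ⟨h1, h2, h3, h4, h5, hL, hR⟩ := hV x y hvis
    refine ⟨h1, h2, h3, h4, h5, ?_, ?_⟩
    · intro hm
      obtain ⟨ha, hb⟩ := hL hm
      refine ⟨ha, ?_⟩
      intro hg
      rcases hb hg with hv' | hq'
      · exact Or.inl hv'
      · rcases pvInQ_cons _ _ _ _ hq' with ⟨he1, he2⟩ | hrest
        · simp at he1 he2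
          rcases hcover with hbad | hvis'
          · omega
          · subst he1; subst he2; exact Or.inl hvis'
        · exact Or.inr hrest
    · intro hm
      obtain ⟨ha, hb⟩ := hR hm
      refine ⟨ha, ?_⟩
      intro hg
      rcases hb hg with hv' | hq'
      · exact Or.inl hv'
      · rcases pvInQ_cons _ _ _ _ hq' with ⟨he1, he2⟩ | hrest
        · simp at he1 he2
          rcases hcover with hbad | hvis'
          · omega
          · subst he1; subst he2; exact Or.inl hvis'
        · exact Or.inr hrest
  · rcases hI0 with hN | hvis | hq
    · exact Or.inl hN
    · exact Or.inr (Or.inl hvis)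
    · rcases pvInQ_cons _ _ _ _ hq with ⟨he1, he2⟩ | hrest
      · simp at he1 he2
        rcases hcover with hbad | hvis'
        · left; omega
        · subst he1; subst he2; exact Or.inr (Or.inl hvis')
      · exact Or.inr (Or.inr hrest)

-- the common part of the four matched/unmatched cases of a BFS expansion step
theorem pvStepCore (N : Int) (S : String) (c : Nat) (l r : Int)
    (rest Q' : List (Nat × Int × Int × Int)) (m : List (List Int)) (res res' v : Int)
    (hShape : pvShape N m)
    (hQ : ∀ c' o' x y, (c', o', x, y) ∈ (c, pvOrd N l r, l, r) :: rest →
      pvReach N S x y ∧ o' = pvOrd N x y ∧ (c' : Int) = pvCnt N x y ∧ 0 ≤ x ∧ y ≤ N - 1 ∧ (c' : Int) ≤ res)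
    (hV : ∀ x y, pvVis m x y → pvReach N S x y ∧ 0 ≤ x ∧ x ≤ y ∧ y ≤ N - 1 ∧ pvCnt N x y ≤ res
      ∧ (pvMatchL N S x y → pvCnt N x y + 1 ≤ res ∧ (x + 1 ≤ y → pvVis m (x + 1) y ∨ pvInQ ((c, pvOrd N l r, l, r) :: rest) (x + 1) y))
      ∧ (pvMatchR N S x y → pvCnt N x y + 1 ≤ res ∧ (x ≤ y - 1 → pvVis m x (y - 1) ∨ pvInQ ((c, pvOrd N l r, l, r) :: rest) x (y - 1))))
    (hI0 : N ≤ 0 ∨ pvVis m 0 (N - 1) ∨ pvInQ ((c, pvOrd N l r, l, r) :: rest) 0 (N - 1))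
    (hres0 : 0 ≤ res) (hresU : res ≤ pvRec N S 0 (N - 1))
    (hreach : pvReach N S l r) (hc : (c : Int) = pvCnt N l r)
    (hl0 : 0 ≤ l) (hlr : l ≤ r) (hrN : r ≤ N - 1) (hcres : (c : Int) ≤ res)
    (hm : pvMget m l r = some v) (hv : v < 0)
    (hmemQ : ∀ e ∈ Q', e ∈ rest
      ∨ (pvMatchL N S l r ∧ e = (c + 1, PySem.Int.mod (pvOrd N l r + 1) 3, l + 1, r))
      ∨ (pvMatchR N S l r ∧ e = (c + 1, PySem.Int.mod (pvOrd N l r + 1) 3, l, r - 1)))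
    (hrest : ∀ e ∈ rest, e ∈ Q')
    (hLin : pvMatchL N S l r → (c + 1, PySem.Int.mod (pvOrd N l r + 1) 3, l + 1, r) ∈ Q')
    (hRin : pvMatchR N S l r → (c + 1, PySem.Int.mod (pvOrd N l r + 1) 3, l, r - 1) ∈ Q')
    (hresle : res ≤ res')
    (hc1res : (pvMatchL N S l r ∨ pvMatchR N S l r) → (c : Int) + 1 ≤ res')
    (hresU' : res' ≤ pvRec N S 0 (N - 1)) :
    pvInv N S Q' (pvMset m l r (c : Int)) res' := by
  have hvisN : ∀ x y, pvVis (pvMset m l r (c : Int)) x y ↔ ((x = l ∧ y = r) ∨ pvVis m x y) :=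
    pvVis_mset m l r v c hm
  have hInQ' : ∀ x y, pvInQ rest x y → pvInQ Q' x y := by
    rintro x y ⟨c', o', hmem⟩
    exact ⟨c', o', hrest _ hmem⟩
  refine ⟨pvShape_mset N m l r (c : Int) hShape, ?_, ?_, ?_, by omega, hresU'⟩
  · -- queue entries
    intro c' o' x y hmem
    rcases hmemQ _ hmem with hr | ⟨hmL, he⟩ | ⟨hmR, he⟩
    · obtain ⟨h1, h2, h3, h4, h5, h6⟩ := hQ c' o' x y (List.mem_cons_of_mem _ hr)
      exact ⟨h1, h2, h3, h4, h5, by omega⟩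
    · simp only [Prod.mk.injEq] at he
      obtain ⟨h1e, h2e, h3e, h4e⟩ := he
      simp only [h1e, h2e, h3e, h4e]
      refine ⟨pvReach.left hreach hl0 hlr hrN hmL, (pvOrd_left N l r).symm, ?_, by omega, hrN, ?_⟩
      · push_cast
        unfold pvCnt at *
        omega
      · have := hc1res (Or.inl hmL)
        push_cast
        omega
    · simp only [Prod.mk.injEq] at he
      obtain ⟨h1e, h2e, h3e, h4e⟩ := he
      simp only [h1e, h2e, h3e, h4e]
      refine ⟨pvReach.right hreach hl0 hlr hrN hmR, (pvOrd_right N l r).symm, ?_, hl0, by omega, ?_⟩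
      · push_cast
        unfold pvCnt at *
        omega
      · have := hc1res (Or.inr hmR)
        push_cast
        omega
  · -- visited states
    intro x y hvis
    rcases (hvisN x y).mp hvis with ⟨rfl, rfl⟩ | hold
    · refine ⟨hreach, hl0, hlr, hrN, by omega, ?_, ?_⟩
      · intro hmL
        refine ⟨by have := hc1res (Or.inl hmL); omega, ?_⟩
        intro _
        exact Or.inr ⟨c + 1, PySem.Int.mod (pvOrd N x y + 1) 3, hLin hmL⟩
      · intro hmR
        refine ⟨by have := hc1res (Or.inr hmR); omega, ?_⟩
        intro _
        exact Or.inr ⟨c + 1, PySem.Int.mod (pvOrd N x y + 1) 3, hRin hmR⟩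
    · obtain ⟨h1, h2, h3, h4, h5, hLo, hRo⟩ := hV x y hold
      refine ⟨h1, h2, h3, h4, by omega, ?_, ?_⟩
      · intro hmL
        obtain ⟨ha, hb⟩ := hLo hmL
        refine ⟨by omega, ?_⟩
        intro hg
        rcases hb hg with hv' | hq'
        · exact Or.inl ((hvisN _ _).mpr (Or.inr hv'))
        · rcases pvInQ_cons _ _ _ _ hq' with ⟨he1, he2⟩ | hrest'
          · simp at he1 he2
            exact Or.inl ((hvisN _ _).mpr (Or.inl ⟨he1.symm, he2.symm⟩))
          · exact Or.inr (hInQ' _ _ hrest')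
      · intro hmR
        obtain ⟨ha, hb⟩ := hRo hmR
        refine ⟨by omega, ?_⟩
        intro hg
        rcases hb hg with hv' | hq'
        · exact Or.inl ((hvisN _ _).mpr (Or.inr hv'))
        · rcases pvInQ_cons _ _ _ _ hq' with ⟨he1, he2⟩ | hrest'
          · simp at he1 he2
            exact Or.inl ((hvisN _ _).mpr (Or.inl ⟨he1.symm, he2.symm⟩))
          · exact Or.inr (hInQ' _ _ hrest')
  · rcases hI0 with hN | hvis | hq
    · exact Or.inl hN
    · exact Or.inr (Or.inl ((hvisN _ _).mpr (Or.inr hvis)))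
    · rcases pvInQ_cons _ _ _ _ hq with ⟨he1, he2⟩ | hrest'
      · simp at he1 he2
        exact Or.inr (Or.inl ((hvisN _ _).mpr (Or.inl ⟨he1.symm, he2.symm⟩)))
      · exact Or.inr (Or.inr (hInQ' _ _ hrest'))

-- result stays bounded by the DP value
theorem pvResUb (N : Int) (S : String) (l r : Int)
    (hreach : pvReach N S l r) (hl0 : 0 ≤ l) (hlr : l ≤ r) (hrN : r ≤ N - 1)
    (hmatch : pvMatchL N S l r ∨ pvMatchR N S l r) :
    pvCnt N l r + 1 ≤ pvRec N S 0 (N - 1) := by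
  have hle := pvReach_le N S l r hreach
  rcases hmatch with hm | hm
  · have h1 := pvRec_left_ge N S l r hlr hm
    have h2 := pvRec_nonneg N S (l + 1) r
    omega
  · have h1 := pvRec_right_ge N S l r hlr hm
    have h2 := pvRec_nonneg N S l (r - 1)
    omega

-- the loop on an empty queue
theorem pvEmpty (N : Int) (S : String) (m : List (List Int)) (res : Int)
    (hInv : pvInv N S [] m res) : res = pvRec N S 0 (N - 1) := by
  obtain ⟨hShape, hQ, hV, hI0, hres0, hresU⟩ := hInv
  rcases hI0 with hN | hvis | hq
  · have h0 : pvRec N S 0 (N - 1) = 0 := by rw [pvRec, if_pos (by omega)]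
    omega
  · have := pvDrain N S m res hV ((N - 1 + 1 - 0).toNat) 0 (N - 1) (le_refl _) hvis
    have hcnt : pvCnt N 0 (N - 1) = 0 := by unfold pvCnt; ring
    omega
  · obtain ⟨_, _, h⟩ := hq
    simp at h

theorem pvLoop (N : Int) (S : String) : ∀ (fuel : Nat) (q : List (Nat × Int × Int × Int))
    (m : List (List Int)) (res : Int),
    3 * pvNegCount m + q.length ≤ fuel → pvInv N S q m res →
    solveLoop N S q m res = pvRec N S 0 (N - 1) := by
  intro fuel
  induction fuel with
  | zero =>
    intro q m res hf hInv
    have hq : q = [] := by cases q <;> simp_all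
    subst hq
    rw [solveLoop]
    exact pvEmpty N S m res hInv
  | succ fuel ih =>
    intro q m res hf hInv
    match q with
    | [] =>
      rw [solveLoop]
      exact pvEmpty N S m res hInv
    | (c, o, l, r) :: rest =>
      obtain ⟨hShape, hQ, hV, hI0, hres0, hresU⟩ := hInv
      obtain ⟨hreach, ho, hc, hl0, hrN, hcres⟩ := hQ c o l r (List.mem_cons_self ..)
      subst ho
      rw [solveLoop]
      by_cases hlr : l > r
      · rw [if_pos hlr]
        refine ih rest m res (by simp at hf; omega) ?_
        exact pvInvDrop N S c _ l r rest m res ⟨hShape, hQ, hV, hI0, hres0, hresU⟩ (Or.inl hlr)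
      · rw [if_neg hlr]
        obtain ⟨v0, hm0⟩ := pvMget_isSome N m l r hShape hl0 (by omega) hrN
        split
        · rename_i heq
          rw [heq] at hm0
          exact absurd hm0 (by simp)
        · rename_i v heq
          have hm : pvMget m l r = some v := heq
          by_cases hv : 0 ≤ v
          · rw [if_pos hv]
            refine ih rest m res (by simp at hf; omega) ?_
            exact pvInvDrop N S c _ l r rest m res ⟨hShape, hQ, hV, hI0, hres0, hresU⟩
              (Or.inr ⟨v, hm, hv⟩)
          · rw [if_neg hv]
            have hvneg : v < 0 := by omega
            have hmeas : ∀ (Q' : List (Nat × Int × Int × Int)), Q'.length ≤ rest.length + 2 →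
                3 * pvNegCount (pvMset m l r (c : Int)) + Q'.length ≤ fuel := by
              intro Q' hlen
              have := pvNegCount_mset_lt m l r v c hm hvneg
              simp at hf
              omega
            by_cases hcL : pvLook S l = some (pvOrd N l r) <;>
              by_cases hcR : pvLook S r = some (pvOrd N l r)
            · -- both match
              simp only [if_pos hcL, if_pos hcR]
              refine ih _ _ _ (hmeas _ (by simp)) ?_
              refine pvStepCore N S c l r rest _ m res _ v hShape hQ hV hI0 hres0 hresU
                hreach hc hl0 (by omega) hrN hcres hm hvneg ?_ ?_ ?_ ?_ (by
                  have := le_max_left (max res ((c : Int) + 1)) ((c : Int) + 1)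
                  have := le_max_left res ((c : Int) + 1)
                  omega) (fun _ => by
                  have := le_max_right (max res ((c : Int) + 1)) ((c : Int) + 1)
                  omega) ?_
              · intro e he
                rcases List.mem_append.mp he with he1 | he2
                · rcases List.mem_append.mp he1 with h' | h''
                  · exact Or.inl h'
                  · exact Or.inr (Or.inl ⟨hcL, by simpa using h''⟩)
                · exact Or.inr (Or.inr ⟨hcR, by simpa using he2⟩)
              · intro e he
                exact List.mem_append_left _ (List.mem_append_left _ he)
              · intro _
                exact List.mem_append_left _ (List.mem_append_right _ (by simp))
              · intro _
                exact List.mem_append_right _ (by simp)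
              · refine max_le (max_le hresU ?_) ?_ <;>
                  exact pvResUb N S l r hreach hl0 (by omega) hrN (Or.inl hcL) |>.trans_eq' (by omega)
            · -- only left matches
              simp only [if_pos hcL, if_neg hcR]
              refine ih _ _ _ (hmeas _ (by simp)) ?_
              refine pvStepCore N S c l r rest _ m res _ v hShape hQ hV hI0 hres0 hresU
                hreach hc hl0 (by omega) hrN hcres hm hvneg ?_ ?_ ?_ ?_
                (le_max_left _ _) (fun _ => le_max_right _ _) ?_
              · intro e he
                rcases List.mem_append.mp he with h' | h''
                · exact Or.inl h'
                · exact Or.inr (Or.inl ⟨hcL, by simpa using h''⟩)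
              · intro e he
                exact List.mem_append_left _ he
              · intro _
                exact List.mem_append_right _ (by simp)
              · intro hmR
                exact absurd hmR hcR
              · exact max_le hresU
                  (pvResUb N S l r hreach hl0 (by omega) hrN (Or.inl hcL) |>.trans_eq' (by omega))
            · -- only right matches
              simp only [if_neg hcL, if_pos hcR]
              refine ih _ _ _ (hmeas _ (by simp)) ?_
              refine pvStepCore N S c l r rest _ m res _ v hShape hQ hV hI0 hres0 hresU
                hreach hc hl0 (by omega) hrN hcres hm hvneg ?_ ?_ ?_ ?_
                (le_max_left _ _) (fun _ => le_max_right _ _) ?_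
              · intro e he
                rcases List.mem_append.mp he with h' | h''
                · exact Or.inl h'
                · exact Or.inr (Or.inr ⟨hcR, by simpa using h''⟩)
              · intro e he
                exact List.mem_append_left _ he
              · intro hmL
                exact absurd hmL hcL
              · intro _
                exact List.mem_append_right _ (by simp)
              · exact max_le hresU
                  (pvResUb N S l r hreach hl0 (by omega) hrN (Or.inr hcR) |>.trans_eq' (by omega))
            · -- no match
              simp only [if_neg hcL, if_neg hcR]
              refine ih _ _ _ (hmeas _ (by omega)) ?_
              refine pvStepCore N S c l r rest _ m res _ v hShape hQ hV hI0 hres0 hresU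
                hreach hc hl0 (by omega) hrN hcres hm hvneg ?_ ?_ ?_ ?_
                (le_refl _) ?_ hresU
              · intro e he
                exact Or.inl he
              · intro e he
                exact he
              · intro hmL
                exact absurd hmL hcL
              · intro hmR
                exact absurd hmR hcR
              · rintro (hmL | hmR)
                · exact absurd hmL hcL
                · exact absurd hmR hcR

theorem pvInv_init (N : Int) (S : String) :
    pvInv N S [(0, 0, 0, N - 1)] (List.replicate N.toNat (List.replicate N.toNat (-1))) 0 := by
  refine ⟨⟨by simp, by intro row h; simp [List.eq_of_mem_replicate h]⟩, ?_, ?_, ?_, le_refl 0, pvRec_nonneg N S 0 (N - 1)⟩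
  · intro c' o' x y hmem
    simp at hmem
    obtain ⟨rfl, rfl, rfl, rfl⟩ := hmem
    refine ⟨pvReach.init, ?_, ?_, le_refl 0, le_refl _, le_refl 0⟩
    · unfold pvOrd pvCnt
      rw [show (0 : Int) + (N - 1 - (N - 1)) = 0 by ring]
      rw [PySem.Int.mod_eq_emod_of_pos (by norm_num)]
      rfl
    · unfold pvCnt
      push_cast
      ring
  · intro x y hvis
    exact absurd hvis (pvVis_replicate N x y)
  · exact Or.inr (Or.inr ⟨0, 0, by simp⟩)

theorem solve_eq_pvRec : ∀ (N : Int) (S : String), solve N S = pvRec N S 0 (N - 1) := by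
  intro N S
  unfold solve
  exact pvLoop N S
    (3 * pvNegCount (List.replicate N.toNat (List.replicate N.toNat (-1))) + 1)
    _ _ _ (le_refl _) (pvInv_init N S)

-- B-side: one step of the length loop
def pvBody (N : Int) (S : String) (prev : List Int) (length l : Int) : Int :=
  let r := l + length - 1
  let o := PySem.Int.mod (l + (N - 1 - r)) 3
  let best := if pvLook S l = some o then 1 + PySem.List.pyGetD prev (l + 1) 0 else 0
  if pvLook S r = some o then max best (1 + PySem.List.pyGetD prev l 0) else best

def pvStep (N : Int) (S : String) (prev : List Int) (length : Int) : List Int :=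
  (PySem.List.pyRange 0 (N - length + 1)).foldl (fun cur l => cur ++ [pvBody N S prev length l]) []

theorem pvFoldAppend {α β : Type} (f : α → β) (xs : List α) (acc : List β) :
    xs.foldl (fun cur x => cur ++ [f x]) acc = acc ++ xs.map f := by
  induction xs generalizing acc with
  | nil => simp
  | cons x xs ih => simp [ih]

theorem pvStep_eq (N : Int) (S : String) (k : Nat) :
    pvStep N S ((PySem.List.pyRange 0 (N - (k : Int) + 1)).map (fun l => pvRec N S l (l + (k : Int) - 1)))
        ((k : Int) + 1)
      = (PySem.List.pyRange 0 (N - ((k : Int) + 1) + 1)).map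
          (fun l => pvRec N S l (l + ((k : Int) + 1) - 1)) := by
  unfold pvStep
  rw [pvFoldAppend]
  rw [List.nil_append]
  apply List.map_congr_left
  intro l hl
  rw [PySem.List.mem_pyRange_one] at hl
  obtain ⟨hl0, hlN⟩ := hl
  unfold pvBody
  have hr : l + ((k : Int) + 1) - 1 = l + (k : Int) := by ring
  have hget1 : PySem.List.pyGetD
      ((PySem.List.pyRange 0 (N - (k : Int) + 1)).map (fun l => pvRec N S l (l + (k : Int) - 1))) (l + 1) 0
      = pvRec N S (l + 1) (l + 1 + (k : Int) - 1) :=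
    PySem.List.pyGetD_map_pyRange_of_nonneg _ _ _ _ (by omega) (by omega)
  have hget0 : PySem.List.pyGetD
      ((PySem.List.pyRange 0 (N - (k : Int) + 1)).map (fun l => pvRec N S l (l + (k : Int) - 1))) l 0
      = pvRec N S l (l + (k : Int) - 1) :=
    PySem.List.pyGetD_map_pyRange_of_nonneg _ _ _ _ (by omega) (by omega)
  have hc1 : l + 1 + (k : Int) - 1 = l + (k : Int) := by ring
  have ho : l + (N - 1 - (l + ((k : Int) + 1) - 1)) = l + (N - 1 - (l + (k : Int))) := by ring
  simp only [hget1, hget0, hr, hc1]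
  have hnl : ¬ l > l + (k : Int) := by omega
  conv_rhs => rw [pvRec, if_neg hnl]
  by_cases hR : pvLook S (l + (k : Int)) = some (PySem.Int.mod (l + (N - 1 - (l + (k : Int)))) 3)
  · simp only [if_pos hR]
  · simp only [if_neg hR]
    by_cases hL : pvLook S l = some (PySem.Int.mod (l + (N - 1 - (l + (k : Int)))) 3)
    · simp only [if_pos hL]
      have := pvRec_nonneg N S (l + 1) (l + (k : Int))
      rw [max_eq_left (by omega)]
    · simp only [if_neg hL, max_self]

theorem pvRow (N : Int) (S : String) :
    ∀ k : Nat, (k : Int) ≤ N →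
      (PySem.List.pyRange 1 ((k : Int) + 1)).foldl (pvStep N S) (List.replicate (N + 1).toNat 0)
        = (PySem.List.pyRange 0 (N - (k : Int) + 1)).map (fun l => pvRec N S l (l + (k : Int) - 1)) := by
  intro k
  induction k with
  | zero =>
    intro _
    rw [PySem.List.pyRange_one_eq_nil (by norm_num)]
    simp only [List.foldl_nil, Nat.cast_zero, sub_zero]
    symm
    rw [List.eq_replicate_iff]
    constructor
    · rw [List.length_map, PySem.List.length_pyRange_one]
      congr 1
      omega
    · intro b hb
      rw [List.mem_map] at hb
      obtain ⟨l, _, rfl⟩ := hb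
      rw [pvRec, if_pos (by omega)]
  | succ k ih =>
    intro hk
    have hk' : (k : Int) ≤ N := by push_cast at hk ⊢; omega
    have hcast : ((k + 1 : Nat) : Int) = (k : Int) + 1 := by push_cast; ring
    rw [hcast]
    rw [PySem.List.pyRange_one_succ_right (by omega)]
    rw [List.foldl_append]
    rw [ih hk']
    simpa using pvStep_eq N S k

theorem solve_alt_eq_pvRec : ∀ (N : Int) (S : String), solve_alt N S = pvRec N S 0 (N - 1) := by
  intro N S
  by_cases hN : N ≤ 0
  · rw [solve_alt, if_pos hN, pvRec, if_pos (by omega)]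
  · rw [solve_alt, if_neg hN]
    have hNk : ((N.toNat : Int)) = N := Int.toNat_of_nonneg (by omega)
    have h := pvRow N S N.toNat (by omega)
    rw [hNk] at h
    show PySem.List.pyGetD ((PySem.List.pyRange 1 (N + 1)).foldl (pvStep N S) (List.replicate (N + 1).toNat 0)) 0 0 = _
    rw [h]
    have : N - N + 1 = 1 := by ring
    rw [this]
    have hone : PySem.List.pyRange 0 (1 : Int) = [0] := by
      rw [show (1 : Int) = 0 + 1 by ring]
      exact PySem.List.pyRange_one_singleton 0
    rw [hone]
    simp only [List.map_cons, List.map_nil]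
    simp [PySem.List.pyGetD]

-- ===== VERDICT (by name: the statement is the Claim_ definition above) =====
theorem solve_spec : Claim_equal_solve := by
  intro N S _ _
  unfold Spec_solve
  rw [solve_eq_pvRec, solve_alt_eq_pvRec]
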